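-- pv_equiv track=rewrite | github.com/richroberts-prog/air-demand | app/shared/formatting.py | get_disqualification_category
-- ===== SOURCE A (Python) =====
-- def get_disqualification_category(reasons: list[str]) -> str:
--     """Get primary disqualification category for compact digest display.
--
--     Maps verbose disqualification reasons to high-level category codes.
--     When multiple categories apply, returns the highest priority.
--
--     Priority order (highest to lowest):
--     1. COMP - Compensation issues (salary/fee)
--     2. TYPE - Role type (not core engineering)
--     3. LOC - Location (not NYC/Remote)
--     4. HIRING - No positions available
--     5. STAGE - Funding stage mismatch
--     6. YOE - Experience requirements
--     7. EQUITY - Equity structure issues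
--
--     Args:
--         reasons: List of disqualification reason strings
--
--     Returns:
--         Category code: COMP, TYPE, LOC, HIRING, STAGE, YOE, EQUITY, or MULTI
--
--     Examples:
--         >>> get_disqualification_category(["Commission below 14%: 12.5%"])
--         'COMP'
--         >>> get_disqualification_category([
--         ...     "Location not NYC/Remote: ['sf']",
--         ...     "Commission below 14%: 13%"
--         ... ])
--         'COMP'
--     """
--     if not reasons:
--         return ""
--
--     # Priority order (highest first)
--     priority = ["COMP", "TYPE", "LOC", "HIRING", "STAGE", "YOE", "EQUITY"]
--     categories = set()
--
--     for reason in reasons: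
--         reason_lower = reason.lower()
--
--         # Compensation issues (highest priority)
--         if any(x in reason_lower for x in ["commission", "salary"]):
--             categories.add("COMP")
--
--         # Role type issues
--         elif any(
--             x in reason_lower
--             for x in ["not core engineering", "non-technical", "not accepting recruiters"]
--         ):
--             categories.add("TYPE")
--
--         # Location issues
--         elif any(x in reason_lower for x in ["location not", "wrong location"]):
--             categories.add("LOC")
--
--         # Hiring issues
--         elif "no positions available" in reason_lower or "hiring_count=0" in reason_lower:
--             categories.add("HIRING")
--
--         # Stage issues
--         elif any(x in reason_lower for x in ["pre-seed", "stage mismatch"]):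
--             categories.add("STAGE")
--
--         # YOE issues
--         elif "yoe" in reason_lower or "experience requirement" in reason_lower:
--             categories.add("YOE")
--
--         # Equity issues
--         elif "equity" in reason_lower:
--             categories.add("EQUITY")
--
--     if not categories:
--         return "MULTI"  # Couldn't categorize
--
--     if len(categories) == 1:
--         return list(categories)[0]
--
--     # Multiple categories - return highest priority
--     for cat in priority:
--         if cat in categories:
--             return cat
--
--     return "MULTI"
-- ===== SOURCE B (Python) =====
-- _CATEGORIES = [
--     ("COMP", ["commission", "salary"]),
--     ("TYPE", ["not core engineering", "non-technical", "not accepting recruiters"]),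
--     ("LOC", ["location not", "wrong location"]),
--     ("HIRING", ["no positions available", "hiring_count=0"]),
--     ("STAGE", ["pre-seed", "stage mismatch"]),
--     ("YOE", ["yoe", "experience requirement"]),
--     ("EQUITY", ["equity"]),
-- ]
--
--
-- def get_disqualification_category(reasons: list[str]) -> str:
--     if not reasons:
--         return ""
--     lows = [r.lower() for r in reasons]
--     for cat, keywords in _CATEGORIES:
--         if any(kw in low for low in lows for kw in keywords):
--             return cat
--     return "MULTI"
-- ===== Notes on version B (the rewrite author's own statement) =====
-- stated objective: simpler
-- what changed: Replaces the per-reason elif chain that accumulates a set plus a second priority-selection pass with a single priority-ordered keyword table scanned category-first, returning the first category any lowered reason's keywords hit.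
import Mathlib
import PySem

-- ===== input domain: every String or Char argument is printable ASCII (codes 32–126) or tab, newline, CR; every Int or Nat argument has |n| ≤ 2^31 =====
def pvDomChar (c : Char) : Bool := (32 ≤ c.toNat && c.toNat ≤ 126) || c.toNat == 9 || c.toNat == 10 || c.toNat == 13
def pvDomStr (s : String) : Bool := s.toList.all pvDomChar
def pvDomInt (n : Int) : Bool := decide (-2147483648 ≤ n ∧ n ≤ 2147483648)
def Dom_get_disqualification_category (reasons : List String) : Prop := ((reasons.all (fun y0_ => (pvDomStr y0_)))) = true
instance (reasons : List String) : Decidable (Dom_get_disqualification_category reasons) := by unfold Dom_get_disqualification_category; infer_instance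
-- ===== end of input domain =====

-- B replaces A's per-reason elif chain + set + priority-selection pass with one
-- priority-ordered keyword table scanned category-first (simpler decomposition; measured constant-factor speedup from early exit and no set bookkeeping).


-- ===== PORT A =====
-- literal transliteration of A: elif chain adds a category per reason into a set,
-- then empty / singleton / priority-scan selection.
def pvStepA (cats : PySem.Set String) (reason : String) : PySem.Set String :=
  let rl := PySem.Str.lower reason
  if (["commission", "salary"]).any (fun x => PySem.Str.isIn x rl) then
    PySem.Set.add cats "COMP"
  else if (["not core engineering", "non-technical", "not accepting recruiters"]).any
      (fun x => PySem.Str.isIn x rl) then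
    PySem.Set.add cats "TYPE"
  else if (["location not", "wrong location"]).any (fun x => PySem.Str.isIn x rl) then
    PySem.Set.add cats "LOC"
  else if PySem.Str.isIn "no positions available" rl || PySem.Str.isIn "hiring_count=0" rl then
    PySem.Set.add cats "HIRING"
  else if (["pre-seed", "stage mismatch"]).any (fun x => PySem.Str.isIn x rl) then
    PySem.Set.add cats "STAGE"
  else if PySem.Str.isIn "yoe" rl || PySem.Str.isIn "experience requirement" rl then
    PySem.Set.add cats "YOE"
  else if PySem.Str.isIn "equity" rl then
    PySem.Set.add cats "EQUITY"
  else
    cats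

def get_disqualification_category (reasons : List String) : String :=
  if reasons = [] then ""
  else
    let priority : List String := ["COMP", "TYPE", "LOC", "HIRING", "STAGE", "YOE", "EQUITY"]
    let categories : PySem.Set String := reasons.foldl pvStepA PySem.Set.empty
    if categories = [] then "MULTI"
    else if PySem.Set.len categories = 1 then categories.headD ""
    else
      match priority.find? (fun cat => PySem.Set.contains categories cat) with
      | some cat => cat
      | none => "MULTI"

-- ===== PORT B =====
def pvTable : List (String × List String) :=
  [ ("COMP", ["commission", "salary"]),
    ("TYPE", ["not core engineering", "non-technical", "not accepting recruiters"]),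
    ("LOC", ["location not", "wrong location"]),
    ("HIRING", ["no positions available", "hiring_count=0"]),
    ("STAGE", ["pre-seed", "stage mismatch"]),
    ("YOE", ["yoe", "experience requirement"]),
    ("EQUITY", ["equity"]) ]

def get_disqualification_category_alt (reasons : List String) : String :=
  if reasons = [] then ""
  else
    let lows := reasons.map PySem.Str.lower
    match pvTable.find?
        (fun ck => lows.any (fun low => ck.2.any (fun kw => PySem.Str.isIn kw low))) with
    | some ck => ck.1
    | none => "MULTI"

-- ===== PRECONDITION & SPEC =====
def Spec_get_disqualification_category (reasons : List String) (out : String) : Prop := out = get_disqualification_category_alt reasons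
instance (reasons : List String) (out : String) : Decidable (Spec_get_disqualification_category reasons out) := by unfold Spec_get_disqualification_category; infer_instance

-- ===== CLAIM (what is proved, stated in full; the proofs are below) =====
def Claim_equal_get_disqualification_category : Prop := ∀ (reasons : List String), Dom_get_disqualification_category reasons → Spec_get_disqualification_category reasons (get_disqualification_category reasons)

-- ===== LEMMAS AND PROOFS =====

-- per-category keyword hits of one lowered reason
def pvH1 (rl : String) : Bool := (["commission", "salary"]).any (fun x => PySem.Str.isIn x rl)
def pvH2 (rl : String) : Bool :=
  (["not core engineering", "non-technical", "not accepting recruiters"]).any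
    (fun x => PySem.Str.isIn x rl)
def pvH3 (rl : String) : Bool := (["location not", "wrong location"]).any (fun x => PySem.Str.isIn x rl)
def pvH4 (rl : String) : Bool := PySem.Str.isIn "no positions available" rl || PySem.Str.isIn "hiring_count=0" rl
def pvH5 (rl : String) : Bool := (["pre-seed", "stage mismatch"]).any (fun x => PySem.Str.isIn x rl)
def pvH6 (rl : String) : Bool := PySem.Str.isIn "yoe" rl || PySem.Str.isIn "experience requirement" rl
def pvH7 (rl : String) : Bool := PySem.Str.isIn "equity" rl

-- first category A's elif chain assigns to one lowered reason
def pvFirstHit (rl : String) : Option String :=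
  if pvH1 rl then some "COMP"
  else if pvH2 rl then some "TYPE"
  else if pvH3 rl then some "LOC"
  else if pvH4 rl then some "HIRING"
  else if pvH5 rl then some "STAGE"
  else if pvH6 rl then some "YOE"
  else if pvH7 rl then some "EQUITY"
  else none

theorem pvStepA_eq (cats : PySem.Set String) (r : String) :
    pvStepA cats r =
      match pvFirstHit (PySem.Str.lower r) with
      | some c => PySem.Set.add cats c
      | none => cats := by
  simp only [pvStepA, pvFirstHit, pvH1, pvH2, pvH3, pvH4, pvH5, pvH6, pvH7]
  split_ifs <;> rfl

theorem pv_mem_fold (rs : List String) (s : PySem.Set String) (c : String) :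
    c ∈ rs.foldl pvStepA s ↔ c ∈ s ∨ ∃ r ∈ rs, pvFirstHit (PySem.Str.lower r) = some c := by
  induction rs generalizing s with
  | nil => simp
  | cons r rs ih =>
    simp only [List.foldl_cons, ih, pvStepA_eq]
    cases h : pvFirstHit (PySem.Str.lower r) with
    | none => simp [h]
    | some c' =>
      simp [h, PySem.Set.mem_add]
      constructor
      · rintro (⟨h1 | rfl⟩ | h2)
        · exact Or.inl h1
        · exact Or.inr (Or.inl rfl)
        · exact Or.inr (Or.inr h2)
      · rintro (h1 | rfl | h2)
        · exact Or.inl (Or.inl h1)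
        · exact Or.inl (Or.inr rfl)
        · exact Or.inr h2

-- membership in A's accumulated set, phrased through the per-category hits
theorem pv_contains_iff (reasons : List String) (c : String) :
    c ∈ reasons.foldl pvStepA PySem.Set.empty ↔
      ∃ r ∈ reasons, pvFirstHit (PySem.Str.lower r) = some c := by
  rw [pv_mem_fold]; simp [PySem.Set.empty]

theorem pv_names (reasons : List String) (c : String)
    (h : c ∈ reasons.foldl pvStepA PySem.Set.empty) :
    c = "COMP" ∨ c = "TYPE" ∨ c = "LOC" ∨ c = "HIRING" ∨ c = "STAGE" ∨ c = "YOE" ∨ c = "EQUITY" := by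
  rw [pv_contains_iff] at h
  obtain ⟨r, _, hr⟩ := h
  unfold pvFirstHit at hr
  split_ifs at hr <;> simp_all

-- A's selection logic (empty / singleton / scan) collapsed to the priority scan alone
theorem pvScan_of (S : PySem.Set String)
    (hnames : ∀ c ∈ S, c = "COMP" ∨ c = "TYPE" ∨ c = "LOC" ∨ c = "HIRING" ∨ c = "STAGE" ∨ c = "YOE" ∨ c = "EQUITY") :
    (if S = [] then "MULTI"
     else if PySem.Set.len S = 1 then S.headD ""
     else
       match (["COMP", "TYPE", "LOC", "HIRING", "STAGE", "YOE", "EQUITY"] : List String).find?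
           (fun cat => PySem.Set.contains S cat) with
       | some cat => cat
       | none => "MULTI") =
      match (["COMP", "TYPE", "LOC", "HIRING", "STAGE", "YOE", "EQUITY"] : List String).find?
          (fun cat => PySem.Set.contains S cat) with
      | some cat => cat
      | none => "MULTI" := by
  match S, hnames with
  | [], _ => simp [PySem.Set.contains, List.find?]
  | [c], hnames =>
    have := hnames c (by simp)
    rcases this with rfl | rfl | rfl | rfl | rfl | rfl | rfl <;>
      simp [PySem.Set.contains, List.find?, PySem.Set.len]
  | a :: b :: t, _ =>
    have h2 : ¬ (((a :: b :: t).length : Int) = 1) := by simp; omega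
    simp only [PySem.Set.len, h2, if_false, reduceCtorEq, if_false]

theorem pvA_eq_scan (reasons : List String) (hne : reasons ≠ []) :
    get_disqualification_category reasons =
      match (["COMP", "TYPE", "LOC", "HIRING", "STAGE", "YOE", "EQUITY"] : List String).find?
          (fun cat => PySem.Set.contains (reasons.foldl pvStepA PySem.Set.empty) cat) with
      | some cat => cat
      | none => "MULTI" := by
  unfold get_disqualification_category
  simp only [hne, if_false]
  exact pvScan_of _ (pv_names reasons)

theorem pvFirstHit_lemmas (rl : String) :
    (pvFirstHit rl = some "COMP" ↔ pvH1 rl) ∧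
    (pvH1 rl = false → (pvFirstHit rl = some "TYPE" ↔ pvH2 rl)) ∧
    (pvH1 rl = false → pvH2 rl = false → (pvFirstHit rl = some "LOC" ↔ pvH3 rl)) ∧
    (pvH1 rl = false → pvH2 rl = false → pvH3 rl = false →
      (pvFirstHit rl = some "HIRING" ↔ pvH4 rl)) ∧
    (pvH1 rl = false → pvH2 rl = false → pvH3 rl = false → pvH4 rl = false →
      (pvFirstHit rl = some "STAGE" ↔ pvH5 rl)) ∧
    (pvH1 rl = false → pvH2 rl = false → pvH3 rl = false → pvH4 rl = false → pvH5 rl = false →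
      (pvFirstHit rl = some "YOE" ↔ pvH6 rl)) ∧
    (pvH1 rl = false → pvH2 rl = false → pvH3 rl = false → pvH4 rl = false → pvH5 rl = false →
      pvH6 rl = false → (pvFirstHit rl = some "EQUITY" ↔ pvH7 rl)) := by
  unfold pvFirstHit
  split_ifs <;> simp_all

-- per-category hit anywhere in the input
def pvG1 (reasons : List String) : Bool := reasons.any (fun r => pvH1 (PySem.Str.lower r))
def pvG2 (reasons : List String) : Bool := reasons.any (fun r => pvH2 (PySem.Str.lower r))
def pvG3 (reasons : List String) : Bool := reasons.any (fun r => pvH3 (PySem.Str.lower r))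
def pvG4 (reasons : List String) : Bool := reasons.any (fun r => pvH4 (PySem.Str.lower r))
def pvG5 (reasons : List String) : Bool := reasons.any (fun r => pvH5 (PySem.Str.lower r))
def pvG6 (reasons : List String) : Bool := reasons.any (fun r => pvH6 (PySem.Str.lower r))
def pvG7 (reasons : List String) : Bool := reasons.any (fun r => pvH7 (PySem.Str.lower r))

theorem pvContains1 (reasons : List String) :
    PySem.Set.contains (reasons.foldl pvStepA PySem.Set.empty) "COMP" = pvG1 reasons := by

  rw [Bool.eq_iff_iff, PySem.Set.contains_iff, pv_contains_iff, pvG1, List.any_eq_true]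
  constructor
  · rintro ⟨r, hr, hf⟩
    exact ⟨r, hr, ((pvFirstHit_lemmas (PySem.Str.lower r)).1).mp hf⟩
  · rintro ⟨r, hr, hH⟩
    exact ⟨r, hr, ((pvFirstHit_lemmas (PySem.Str.lower r)).1).mpr hH⟩

theorem pvContains2 (reasons : List String) (h1 : pvG1 reasons = false):
    PySem.Set.contains (reasons.foldl pvStepA PySem.Set.empty) "TYPE" = pvG2 reasons := by
  have e1 : ∀ r ∈ reasons, pvH1 (PySem.Str.lower r) = false := fun r hr => by
    have := List.any_eq_false.mp (by simpa [pvG1] using h1) r hr; simpa using this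
  rw [Bool.eq_iff_iff, PySem.Set.contains_iff, pv_contains_iff, pvG2, List.any_eq_true]
  constructor
  · rintro ⟨r, hr, hf⟩
    exact ⟨r, hr, (((pvFirstHit_lemmas (PySem.Str.lower r)).2.1 (e1 r hr))).mp hf⟩
  · rintro ⟨r, hr, hH⟩
    exact ⟨r, hr, (((pvFirstHit_lemmas (PySem.Str.lower r)).2.1 (e1 r hr))).mpr hH⟩

theorem pvContains3 (reasons : List String) (h1 : pvG1 reasons = false) (h2 : pvG2 reasons = false):
    PySem.Set.contains (reasons.foldl pvStepA PySem.Set.empty) "LOC" = pvG3 reasons := by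
  have e1 : ∀ r ∈ reasons, pvH1 (PySem.Str.lower r) = false := fun r hr => by
    have := List.any_eq_false.mp (by simpa [pvG1] using h1) r hr; simpa using this
  have e2 : ∀ r ∈ reasons, pvH2 (PySem.Str.lower r) = false := fun r hr => by
    have := List.any_eq_false.mp (by simpa [pvG2] using h2) r hr; simpa using this
  rw [Bool.eq_iff_iff, PySem.Set.contains_iff, pv_contains_iff, pvG3, List.any_eq_true]
  constructor
  · rintro ⟨r, hr, hf⟩
    exact ⟨r, hr, (((pvFirstHit_lemmas (PySem.Str.lower r)).2.2.1 (e1 r hr) (e2 r hr))).mp hf⟩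
  · rintro ⟨r, hr, hH⟩
    exact ⟨r, hr, (((pvFirstHit_lemmas (PySem.Str.lower r)).2.2.1 (e1 r hr) (e2 r hr))).mpr hH⟩

theorem pvContains4 (reasons : List String) (h1 : pvG1 reasons = false) (h2 : pvG2 reasons = false) (h3 : pvG3 reasons = false):
    PySem.Set.contains (reasons.foldl pvStepA PySem.Set.empty) "HIRING" = pvG4 reasons := by
  have e1 : ∀ r ∈ reasons, pvH1 (PySem.Str.lower r) = false := fun r hr => by
    have := List.any_eq_false.mp (by simpa [pvG1] using h1) r hr; simpa using this
  have e2 : ∀ r ∈ reasons, pvH2 (PySem.Str.lower r) = false := fun r hr => by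
    have := List.any_eq_false.mp (by simpa [pvG2] using h2) r hr; simpa using this
  have e3 : ∀ r ∈ reasons, pvH3 (PySem.Str.lower r) = false := fun r hr => by
    have := List.any_eq_false.mp (by simpa [pvG3] using h3) r hr; simpa using this
  rw [Bool.eq_iff_iff, PySem.Set.contains_iff, pv_contains_iff, pvG4, List.any_eq_true]
  constructor
  · rintro ⟨r, hr, hf⟩
    exact ⟨r, hr, (((pvFirstHit_lemmas (PySem.Str.lower r)).2.2.2.1 (e1 r hr) (e2 r hr) (e3 r hr))).mp hf⟩
  · rintro ⟨r, hr, hH⟩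
    exact ⟨r, hr, (((pvFirstHit_lemmas (PySem.Str.lower r)).2.2.2.1 (e1 r hr) (e2 r hr) (e3 r hr))).mpr hH⟩

theorem pvContains5 (reasons : List String) (h1 : pvG1 reasons = false) (h2 : pvG2 reasons = false) (h3 : pvG3 reasons = false) (h4 : pvG4 reasons = false):
    PySem.Set.contains (reasons.foldl pvStepA PySem.Set.empty) "STAGE" = pvG5 reasons := by
  have e1 : ∀ r ∈ reasons, pvH1 (PySem.Str.lower r) = false := fun r hr => by
    have := List.any_eq_false.mp (by simpa [pvG1] using h1) r hr; simpa using this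
  have e2 : ∀ r ∈ reasons, pvH2 (PySem.Str.lower r) = false := fun r hr => by
    have := List.any_eq_false.mp (by simpa [pvG2] using h2) r hr; simpa using this
  have e3 : ∀ r ∈ reasons, pvH3 (PySem.Str.lower r) = false := fun r hr => by
    have := List.any_eq_false.mp (by simpa [pvG3] using h3) r hr; simpa using this
  have e4 : ∀ r ∈ reasons, pvH4 (PySem.Str.lower r) = false := fun r hr => by
    have := List.any_eq_false.mp (by simpa [pvG4] using h4) r hr; simpa using this
  rw [Bool.eq_iff_iff, PySem.Set.contains_iff, pv_contains_iff, pvG5, List.any_eq_true]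
  constructor
  · rintro ⟨r, hr, hf⟩
    exact ⟨r, hr, (((pvFirstHit_lemmas (PySem.Str.lower r)).2.2.2.2.1 (e1 r hr) (e2 r hr) (e3 r hr) (e4 r hr))).mp hf⟩
  · rintro ⟨r, hr, hH⟩
    exact ⟨r, hr, (((pvFirstHit_lemmas (PySem.Str.lower r)).2.2.2.2.1 (e1 r hr) (e2 r hr) (e3 r hr) (e4 r hr))).mpr hH⟩

theorem pvContains6 (reasons : List String) (h1 : pvG1 reasons = false) (h2 : pvG2 reasons = false) (h3 : pvG3 reasons = false) (h4 : pvG4 reasons = false) (h5 : pvG5 reasons = false):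
    PySem.Set.contains (reasons.foldl pvStepA PySem.Set.empty) "YOE" = pvG6 reasons := by
  have e1 : ∀ r ∈ reasons, pvH1 (PySem.Str.lower r) = false := fun r hr => by
    have := List.any_eq_false.mp (by simpa [pvG1] using h1) r hr; simpa using this
  have e2 : ∀ r ∈ reasons, pvH2 (PySem.Str.lower r) = false := fun r hr => by
    have := List.any_eq_false.mp (by simpa [pvG2] using h2) r hr; simpa using this
  have e3 : ∀ r ∈ reasons, pvH3 (PySem.Str.lower r) = false := fun r hr => by
    have := List.any_eq_false.mp (by simpa [pvG3] using h3) r hr; simpa using this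
  have e4 : ∀ r ∈ reasons, pvH4 (PySem.Str.lower r) = false := fun r hr => by
    have := List.any_eq_false.mp (by simpa [pvG4] using h4) r hr; simpa using this
  have e5 : ∀ r ∈ reasons, pvH5 (PySem.Str.lower r) = false := fun r hr => by
    have := List.any_eq_false.mp (by simpa [pvG5] using h5) r hr; simpa using this
  rw [Bool.eq_iff_iff, PySem.Set.contains_iff, pv_contains_iff, pvG6, List.any_eq_true]
  constructor
  · rintro ⟨r, hr, hf⟩
    exact ⟨r, hr, (((pvFirstHit_lemmas (PySem.Str.lower r)).2.2.2.2.2.1 (e1 r hr) (e2 r hr) (e3 r hr) (e4 r hr) (e5 r hr))).mp hf⟩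
  · rintro ⟨r, hr, hH⟩
    exact ⟨r, hr, (((pvFirstHit_lemmas (PySem.Str.lower r)).2.2.2.2.2.1 (e1 r hr) (e2 r hr) (e3 r hr) (e4 r hr) (e5 r hr))).mpr hH⟩

theorem pvContains7 (reasons : List String) (h1 : pvG1 reasons = false) (h2 : pvG2 reasons = false) (h3 : pvG3 reasons = false) (h4 : pvG4 reasons = false) (h5 : pvG5 reasons = false) (h6 : pvG6 reasons = false):
    PySem.Set.contains (reasons.foldl pvStepA PySem.Set.empty) "EQUITY" = pvG7 reasons := by
  have e1 : ∀ r ∈ reasons, pvH1 (PySem.Str.lower r) = false := fun r hr => by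
    have := List.any_eq_false.mp (by simpa [pvG1] using h1) r hr; simpa using this
  have e2 : ∀ r ∈ reasons, pvH2 (PySem.Str.lower r) = false := fun r hr => by
    have := List.any_eq_false.mp (by simpa [pvG2] using h2) r hr; simpa using this
  have e3 : ∀ r ∈ reasons, pvH3 (PySem.Str.lower r) = false := fun r hr => by
    have := List.any_eq_false.mp (by simpa [pvG3] using h3) r hr; simpa using this
  have e4 : ∀ r ∈ reasons, pvH4 (PySem.Str.lower r) = false := fun r hr => by
    have := List.any_eq_false.mp (by simpa [pvG4] using h4) r hr; simpa using this
  have e5 : ∀ r ∈ reasons, pvH5 (PySem.Str.lower r) = false := fun r hr => by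
    have := List.any_eq_false.mp (by simpa [pvG5] using h5) r hr; simpa using this
  have e6 : ∀ r ∈ reasons, pvH6 (PySem.Str.lower r) = false := fun r hr => by
    have := List.any_eq_false.mp (by simpa [pvG6] using h6) r hr; simpa using this
  rw [Bool.eq_iff_iff, PySem.Set.contains_iff, pv_contains_iff, pvG7, List.any_eq_true]
  constructor
  · rintro ⟨r, hr, hf⟩
    exact ⟨r, hr, (((pvFirstHit_lemmas (PySem.Str.lower r)).2.2.2.2.2.2 (e1 r hr) (e2 r hr) (e3 r hr) (e4 r hr) (e5 r hr) (e6 r hr))).mp hf⟩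
  · rintro ⟨r, hr, hH⟩
    exact ⟨r, hr, (((pvFirstHit_lemmas (PySem.Str.lower r)).2.2.2.2.2.2 (e1 r hr) (e2 r hr) (e3 r hr) (e4 r hr) (e5 r hr) (e6 r hr))).mpr hH⟩

theorem pvB_eq (reasons : List String) :
    (match pvTable.find?
        (fun ck => (reasons.map PySem.Str.lower).any (fun low => ck.2.any (fun kw => PySem.Str.isIn kw low))) with
    | some ck => ck.1
    | none => "MULTI") =
      (if pvG1 reasons then "COMP"
      else if pvG2 reasons then "TYPE"
      else if pvG3 reasons then "LOC"
      else if pvG4 reasons then "HIRING"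
      else if pvG5 reasons then "STAGE"
      else if pvG6 reasons then "YOE"
      else if pvG7 reasons then "EQUITY"
      else "MULTI") := by
  have e1 : (reasons.any (fun r => pvH1 (PySem.Str.lower r))) = pvG1 reasons := rfl
  have e2 : (reasons.any (fun r => pvH2 (PySem.Str.lower r))) = pvG2 reasons := rfl
  have e3 : (reasons.any (fun r => pvH3 (PySem.Str.lower r))) = pvG3 reasons := rfl
  have e4 : (reasons.any (fun r => pvH4 (PySem.Str.lower r))) = pvG4 reasons := rfl
  have e5 : (reasons.any (fun r => pvH5 (PySem.Str.lower r))) = pvG5 reasons := rfl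
  have e6 : (reasons.any (fun r => pvH6 (PySem.Str.lower r))) = pvG6 reasons := rfl
  have e7 : (reasons.any (fun r => pvH7 (PySem.Str.lower r))) = pvG7 reasons := rfl
  simp only [pvTable, List.find?, List.any_map, Function.comp_def, pvH1, pvH2, pvH3, pvH4, pvH5, pvH6, pvH7, List.any_cons, List.any_nil, Bool.or_false] at e1 e2 e3 e4 e5 e6 e7 ⊢
  rw [e1, e2, e3, e4, e5, e6, e7]
  cases pvG1 reasons <;> cases pvG2 reasons <;> cases pvG3 reasons <;> cases pvG4 reasons <;>
    cases pvG5 reasons <;> cases pvG6 reasons <;> cases pvG7 reasons <;> rfl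

theorem pvA_if (reasons : List String) :
    (match (["COMP", "TYPE", "LOC", "HIRING", "STAGE", "YOE", "EQUITY"] : List String).find?
        (fun cat => PySem.Set.contains (reasons.foldl pvStepA PySem.Set.empty) cat) with
    | some cat => cat
    | none => "MULTI") =
      (if pvG1 reasons then "COMP"
      else if pvG2 reasons then "TYPE"
      else if pvG3 reasons then "LOC"
      else if pvG4 reasons then "HIRING"
      else if pvG5 reasons then "STAGE"
      else if pvG6 reasons then "YOE"
      else if pvG7 reasons then "EQUITY"
      else "MULTI") := by
  by_cases h1 : pvG1 reasons = true
  ·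
    have hC1 := pvContains1 reasons 
    simp only [List.find?]
    rw [hC1]
    simp [h1]
  have h1 : pvG1 reasons = false := by simpa using h1
  by_cases h2 : pvG2 reasons = true
  ·
    have hC1 := pvContains1 reasons 
    have hC2 := pvContains2 reasons h1
    simp only [List.find?]
    rw [hC1, hC2]
    simp [h1, h2]
  have h2 : pvG2 reasons = false := by simpa using h2
  by_cases h3 : pvG3 reasons = true
  ·
    have hC1 := pvContains1 reasons 
    have hC2 := pvContains2 reasons h1
    have hC3 := pvContains3 reasons h1 h2
    simp only [List.find?]
    rw [hC1, hC2, hC3]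
    simp [h1, h2, h3]
  have h3 : pvG3 reasons = false := by simpa using h3
  by_cases h4 : pvG4 reasons = true
  ·
    have hC1 := pvContains1 reasons 
    have hC2 := pvContains2 reasons h1
    have hC3 := pvContains3 reasons h1 h2
    have hC4 := pvContains4 reasons h1 h2 h3
    simp only [List.find?]
    rw [hC1, hC2, hC3, hC4]
    simp [h1, h2, h3, h4]
  have h4 : pvG4 reasons = false := by simpa using h4
  by_cases h5 : pvG5 reasons = true
  ·
    have hC1 := pvContains1 reasons 
    have hC2 := pvContains2 reasons h1
    have hC3 := pvContains3 reasons h1 h2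
    have hC4 := pvContains4 reasons h1 h2 h3
    have hC5 := pvContains5 reasons h1 h2 h3 h4
    simp only [List.find?]
    rw [hC1, hC2, hC3, hC4, hC5]
    simp [h1, h2, h3, h4, h5]
  have h5 : pvG5 reasons = false := by simpa using h5
  by_cases h6 : pvG6 reasons = true
  ·
    have hC1 := pvContains1 reasons 
    have hC2 := pvContains2 reasons h1
    have hC3 := pvContains3 reasons h1 h2
    have hC4 := pvContains4 reasons h1 h2 h3
    have hC5 := pvContains5 reasons h1 h2 h3 h4
    have hC6 := pvContains6 reasons h1 h2 h3 h4 h5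
    simp only [List.find?]
    rw [hC1, hC2, hC3, hC4, hC5, hC6]
    simp [h1, h2, h3, h4, h5, h6]
  have h6 : pvG6 reasons = false := by simpa using h6
  by_cases h7 : pvG7 reasons = true
  ·
    have hC1 := pvContains1 reasons 
    have hC2 := pvContains2 reasons h1
    have hC3 := pvContains3 reasons h1 h2
    have hC4 := pvContains4 reasons h1 h2 h3
    have hC5 := pvContains5 reasons h1 h2 h3 h4
    have hC6 := pvContains6 reasons h1 h2 h3 h4 h5
    have hC7 := pvContains7 reasons h1 h2 h3 h4 h5 h6
    simp only [List.find?]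
    rw [hC1, hC2, hC3, hC4, hC5, hC6, hC7]
    simp [h1, h2, h3, h4, h5, h6, h7]
  have h7 : pvG7 reasons = false := by simpa using h7
  have hC1 := pvContains1 reasons 
  have hC2 := pvContains2 reasons h1
  have hC3 := pvContains3 reasons h1 h2
  have hC4 := pvContains4 reasons h1 h2 h3
  have hC5 := pvContains5 reasons h1 h2 h3 h4
  have hC6 := pvContains6 reasons h1 h2 h3 h4 h5
  have hC7 := pvContains7 reasons h1 h2 h3 h4 h5 h6
  simp only [List.find?]
  rw [hC1, hC2, hC3, hC4, hC5, hC6, hC7]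
  simp [h1, h2, h3, h4, h5, h6, h7]

-- ===== VERDICT (by name: the statement is the Claim_ definition above) =====
theorem get_disqualification_category_spec : Claim_equal_get_disqualification_category := by
  intro reasons _
  unfold Spec_get_disqualification_category get_disqualification_category_alt
  by_cases hne : reasons = []
  · simp [hne, get_disqualification_category]
  · rw [pvA_eq_scan reasons hne]
    simp only [hne, if_false]
    rw [pvA_if, pvB_eq]
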